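-- pv_equiv track=rewrite | github.com/pete-RK/LeetCode | dynamic-programming/count-the-repetitions.py | getMaxRepetitions
-- ===== SOURCE A (Python) =====
-- def getMaxRepetitions(s1, n1, s2, n2):
--     """
--     :type s1: str
--     :type n1: int
--     :type s2: str
--     :type n2: int
--     :rtype: int
--     """
--     if not set(s2).issubset(set(s1)):
--         return 0
--
--     s1_count, s2_count = 0, 0
--     s1_len, s2_len = len(s1), len(s2)
--
--     index_s1, index_s2 = 0, 0
--     index_map = {}
--
--     while s1_count < n1:
--         if s1[index_s1] == s2[index_s2]:
--             index_s2 += 1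
--             if index_s2 == s2_len:
--                 s2_count += 1
--                 index_s2 = 0
--         index_s1 += 1
--         if index_s1 == s1_len:
--             s1_count += 1
--             index_s1 = 0
--
--             if (index_s1, index_s2) in index_map:
--                 prev_s1_count, prev_s2_count = index_map[(index_s1, index_s2)]
--                 cycle_len = s1_count - prev_s1_count
--                 cycle_count = (n1 - s1_count) // cycle_len
--                 s1_count += cycle_count * cycle_len
--                 s2_count += cycle_count * (s2_count - prev_s2_count)
--
--             index_map[(index_s1, index_s2)] = (s1_count, s2_count)
--
--     return s2_count // n2
-- ===== SOURCE B (Python) =====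
-- # Binary lifting: build the one-pass transition table over s2 start indices once,
-- # then reach n1 copies by repeated squaring of that table (no cycle detection).
-- def getMaxRepetitions(s1, n1, s2, n2):
--     if not set(s2).issubset(set(s1)):
--         return 0
--     m = len(s2)
--     base = []
--     for j in range(m):
--         cnt, k = 0, j
--         for ch in s1:
--             if ch == s2[k]:
--                 k += 1
--                 if k == m:
--                     cnt += 1
--                     k = 0
--         base.append((cnt, k))
--     total, idx, e, cur = 0, 0, n1, base
--     while e > 0:
--         if e & 1:
--             c, nxt = cur[idx]
--             total += c
--             idx = nxt
--         cur = [(cur[j][0] + cur[cur[j][1]][0], cur[cur[j][1]][1]) for j in range(m)]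
--         e >>= 1
--     return total // n2
-- ===== Notes on version B (the rewrite author's own statement) =====
-- stated objective: alternative
-- what changed: Replaces A's single char-by-char while loop with online (index_s1,index_s2)-keyed cycle detection by a staged algorithm: first build the full one-s1-pass transition table over every s2 start index, then raise that table to the n1-th power by binary lifting (repeated squaring), applying set bits to the running (total, index) pair; no cycle map or state history is kept.
import Mathlib
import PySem

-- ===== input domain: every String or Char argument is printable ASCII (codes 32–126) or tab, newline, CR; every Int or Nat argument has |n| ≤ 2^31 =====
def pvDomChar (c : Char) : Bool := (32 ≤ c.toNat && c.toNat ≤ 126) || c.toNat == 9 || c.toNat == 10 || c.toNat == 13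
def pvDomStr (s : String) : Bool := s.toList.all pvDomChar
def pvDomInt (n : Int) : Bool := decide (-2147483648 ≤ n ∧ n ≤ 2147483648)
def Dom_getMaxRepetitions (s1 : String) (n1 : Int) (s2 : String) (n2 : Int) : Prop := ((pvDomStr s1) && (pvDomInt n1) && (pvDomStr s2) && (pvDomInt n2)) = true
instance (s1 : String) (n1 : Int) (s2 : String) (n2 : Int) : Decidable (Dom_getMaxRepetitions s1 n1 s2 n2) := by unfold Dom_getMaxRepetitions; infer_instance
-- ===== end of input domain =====

-- B replaces A's online char-level simulation with cycle detection by a precomputed one-pass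
-- transition table over s2 raised to the n1-th power by repeated squaring (objective: alternative).


-- ===== PORT A =====
-- A's while loop, one recursive call per loop iteration; fuel is a sufficient upper bound on
-- the number of iterations (proved below); 'none' = IndexError / fuel exhaustion (excluded by Pre_).
def pvAgo (L1 L2 : List Char) (n1 : Int) (fuel : Nat) (s1c s2c i1 i2 : Int)
    (mp : PySem.Dict (Int × Int) (Int × Int)) : Option Int :=
  if s1c < n1 then
    match fuel with
    | 0 => none
    | fuel + 1 =>
      match PySem.List.pyGet? L1 i1, PySem.List.pyGet? L2 i2 with
      | some c1, some c2 =>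
        let i2a : Int := if c1 = c2 then (if i2 + 1 = (L2.length : Int) then 0 else i2 + 1) else i2
        let s2a : Int := if c1 = c2 ∧ i2 + 1 = (L2.length : Int) then s2c + 1 else s2c
        if i1 + 1 = (L1.length : Int) then
          match mp.get? (0, i2a) with
          | some pv =>
            let cl := (s1c + 1) - pv.1
            let q := PySem.Int.floordiv (n1 - (s1c + 1)) cl
            let s1b := (s1c + 1) + q * cl
            let s2b := s2a + q * (s2a - pv.2)
            pvAgo L1 L2 n1 fuel s1b s2b 0 i2a (mp.insert (0, i2a) (s1b, s2b))
          | none =>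
            pvAgo L1 L2 n1 fuel (s1c + 1) s2a 0 i2a (mp.insert (0, i2a) (s1c + 1, s2a))
        else
          pvAgo L1 L2 n1 fuel s1c s2a (i1 + 1) i2a mp
      | _, _ => none
  else some s2c

def getMaxRepetitions (s1 : String) (n1 : Int) (s2 : String) (n2 : Int) : Int :=
  if PySem.Set.issubset (PySem.Set.ofList s2.toList) (PySem.Set.ofList s1.toList) then
    match pvAgo s1.toList s2.toList n1 (n1.toNat * s1.toList.length + s1.toList.length + 1)
        0 0 0 0 PySem.Dict.empty with
    | some r => PySem.Int.floordiv r n2   -- n2 = 0 raises ZeroDivisionError in Python: excluded by Pre_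
    | none => 0                           -- IndexError path (empty s2 with n1 > 0): excluded by Pre_
  else 0

-- ===== PORT B =====
-- Source B's inner pass for one table row: feed one copy of s1 starting with s2-pointer j.
def pvBrow (L1 L2 : List Char) (j : Int) : Option (Int × Int) :=
  L1.foldl (fun acc ch =>
    match acc with
    | none => none
    | some (cnt, k) =>
      match PySem.List.pyGet? L2 k with
      | none => none  -- IndexError (only reachable for empty s2; excluded by Pre_)
      | some ck =>
        if ch = ck then
          (if k + 1 = (L2.length : Int) then some (cnt + 1, 0) else some (cnt, k + 1))
        else some (cnt, k)) (some (0, j))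

-- shared shape of Source B's two list-building loops (base table loop and compose comprehension)
def pvBuild {α : Type} (g : Int → Option α) (l : List Int) : Option (List α) :=
  l.foldl (fun acc j =>
    match acc, g j with
    | some bs, some r => some (bs ++ [r])
    | _, _ => none) (some [])

def pvBase (L1 L2 : List Char) : Option (List (Int × Int)) :=
  pvBuild (pvBrow L1 L2) (PySem.List.pyRange 0 (L2.length : Int) 1)

-- one element of Source B's compose comprehension: (cur[j][0] + cur[cur[j][1]][0], cur[cur[j][1]][1])
def pvCEntry (cur : List (Int × Int)) (j : Int) : Option (Int × Int) :=
  match PySem.List.pyGet? cur j with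
  | none => none
  | some (c1, k1) =>
    match PySem.List.pyGet? cur k1 with
    | none => none
    | some (c2, k2) => some (c1 + c2, k2)

def pvCompose (cur : List (Int × Int)) (m : Int) : Option (List (Int × Int)) :=
  pvBuild (pvCEntry cur) (PySem.List.pyRange 0 m 1)

-- Source B's while e > 0 loop (binary lifting); e >>= 1 is floor division by 2, e & 1 is e mod 2;
-- fuel ≥ the bit length of e suffices (proved below).
def pvBloop (m : Int) (fuel : Nat) (cur : List (Int × Int)) (total idx e : Int) : Option Int :=
  if 0 < e then
    match fuel with
    | 0 => none
    | fuel + 1 =>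
      let stepped : Option (Int × Int) :=
        if PySem.Int.mod e 2 = 1 then
          match PySem.List.pyGet? cur idx with
          | none => none  -- IndexError on empty table (empty s2; excluded by Pre_)
          | some (c, nxt) => some (total + c, nxt)
        else some (total, idx)
      match stepped with
      | none => none
      | some (total', idx') =>
        match pvCompose cur m with
        | none => none
        | some cur' => pvBloop m fuel cur' total' idx' (PySem.Int.floordiv e 2)
  else some total

def getMaxRepetitions_alt (s1 : String) (n1 : Int) (s2 : String) (n2 : Int) : Int :=
  if PySem.Set.issubset (PySem.Set.ofList s2.toList) (PySem.Set.ofList s1.toList) then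
    match pvBase s1.toList s2.toList with
    | some base =>
      match pvBloop (s2.toList.length : Int) (n1.toNat + 1) base 0 0 n1 with
      | some t => PySem.Int.floordiv t n2   -- n2 = 0 raises in Python: excluded by Pre_
      | none => 0                           -- IndexError path: excluded by Pre_
    | none => 0
  else 0

-- ===== PRECONDITION & SPEC =====
-- Pre_ is exactly where the Python A returns: it excludes only inputs on which A raises —
-- IndexError (empty s2 with n1 > 0: A indexes s2[0]) and ZeroDivisionError (n2 = 0 reaching
-- the final division, i.e. whenever set(s2) ⊆ set(s1)).
def Pre_getMaxRepetitions (s1 : String) (n1 : Int) (s2 : String) (n2 : Int) : Prop :=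
  (¬ s2.toList.all (fun c => s1.toList.contains c) = true) ∨
    (n2 ≠ 0 ∧ (n1 ≤ 0 ∨ s2.toList ≠ []))
instance (s1 : String) (n1 : Int) (s2 : String) (n2 : Int) : Decidable (Pre_getMaxRepetitions s1 n1 s2 n2) := by unfold Pre_getMaxRepetitions; infer_instance
def pvWitness_getMaxRepetitions : String × Int × String × Int := ("ab", 2, "b", 1)

def Spec_getMaxRepetitions (s1 : String) (n1 : Int) (s2 : String) (n2 : Int) (out : Int) : Prop := out = getMaxRepetitions_alt s1 n1 s2 n2
instance (s1 : String) (n1 : Int) (s2 : String) (n2 : Int) (out : Int) : Decidable (Spec_getMaxRepetitions s1 n1 s2 n2 out) := by unfold Spec_getMaxRepetitions; infer_instance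

-- ===== CLAIM (what is proved, stated in full; the proofs are below) =====
def Claim_equal_getMaxRepetitions : Prop := ∀ (s1 : String) (n1 : Int) (s2 : String) (n2 : Int), Dom_getMaxRepetitions s1 n1 s2 n2 → Pre_getMaxRepetitions s1 n1 s2 n2 → Spec_getMaxRepetitions s1 n1 s2 n2 (getMaxRepetitions s1 n1 s2 n2)

-- ===== LEMMAS AND PROOFS =====

-- Semantic model shared by both proofs: one character step / one s1-pass over the s2-pointer.
def pvPstep (L2 : List Char) (s : Nat × Int) (ch : Char) : Nat × Int :=
  if ch = L2.getD s.1 default then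
    (if s.1 + 1 = L2.length then (0, s.2 + 1) else (s.1 + 1, s.2))
  else s

def pvPass (L1 L2 : List Char) (j : Nat) : Nat × Int := L1.foldl (pvPstep L2) (j, 0)

def pvF (L1 L2 : List Char) : Nat → Nat
  | 0 => 0
  | k + 1 => (pvPass L1 L2 (pvF L1 L2 k)).1

def pvS (L1 L2 : List Char) : Nat → Int
  | 0 => 0
  | k + 1 => pvS L1 L2 k + (pvPass L1 L2 (pvF L1 L2 k)).2

-- t-fold iterate from an arbitrary start index (B's table entries are these for t = 2^i)
def pvIF (L1 L2 : List Char) (j : Nat) : Nat → Nat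
  | 0 => j
  | t + 1 => (pvPass L1 L2 (pvIF L1 L2 j t)).1

def pvIS (L1 L2 : List Char) (j : Nat) : Nat → Int
  | 0 => 0
  | t + 1 => pvIS L1 L2 j t + (pvPass L1 L2 (pvIF L1 L2 j t)).2

lemma pvPstep_fst_lt (L2 : List Char) (hm : 0 < L2.length) (s : Nat × Int) (ch : Char)
    (h : s.1 < L2.length) : (pvPstep L2 s ch).1 < L2.length := by
  unfold pvPstep; split_ifs <;> simp_all <;> omega

lemma foldl_pvPstep_fst_lt (L2 : List Char) (hm : 0 < L2.length) :
    ∀ (L1 : List Char) (s : Nat × Int), s.1 < L2.length →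
      (L1.foldl (pvPstep L2) s).1 < L2.length := by
  intro L1
  induction L1 with
  | nil => intro s h; simpa using h
  | cons ch t ih => intro s h; simpa using ih _ (pvPstep_fst_lt L2 hm s ch h)

lemma pvF_lt (L1 L2 : List Char) (hm : 0 < L2.length) : ∀ k, pvF L1 L2 k < L2.length := by
  intro k
  induction k with
  | zero => simpa [pvF] using hm
  | succ k ih => exact foldl_pvPstep_fst_lt L2 hm L1 _ ih

lemma pvIF_lt (L1 L2 : List Char) (hm : 0 < L2.length) (j : Nat) (hj : j < L2.length) :
    ∀ t, pvIF L1 L2 j t < L2.length := by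
  intro t
  induction t with
  | zero => simpa [pvIF] using hj
  | succ t ih => exact foldl_pvPstep_fst_lt L2 hm L1 _ ih

lemma pvF_eq_pvIF (L1 L2 : List Char) : ∀ k, pvF L1 L2 k = pvIF L1 L2 0 k := by
  intro k
  induction k with
  | zero => rfl
  | succ k ih => simp [pvF, pvIF, ih]

lemma pvS_eq_pvIS (L1 L2 : List Char) : ∀ k, pvS L1 L2 k = pvIS L1 L2 0 k := by
  intro k
  induction k with
  | zero => rfl
  | succ k ih => simp [pvS, pvIS, ih, pvF_eq_pvIF]

lemma pvIter_add (L1 L2 : List Char) (j : Nat) (a : Nat) :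
    ∀ b, pvIF L1 L2 j (a + b) = pvIF L1 L2 (pvIF L1 L2 j a) b ∧
      pvIS L1 L2 j (a + b) = pvIS L1 L2 j a + pvIS L1 L2 (pvIF L1 L2 j a) b := by
  intro b
  induction b with
  | zero => simp [pvIF, pvIS]
  | succ b ih =>
    obtain ⟨ihF, ihS⟩ := ih
    constructor
    · show pvIF L1 L2 j ((a + b) + 1) = _
      simp [pvIF, ihF]
    · show pvIS L1 L2 j ((a + b) + 1) = _
      simp [pvIS, ihF, ihS]
      ring

lemma pvPstep_shift (L2 : List Char) (j : Nat) (d : Int) (ch : Char) :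
    pvPstep L2 (j, d) ch = ((pvPstep L2 (j, 0) ch).1, d + (pvPstep L2 (j, 0) ch).2) := by
  unfold pvPstep; dsimp only; split_ifs <;> simp

lemma foldl_pvPstep_shift (L2 : List Char) :
    ∀ (L1 : List Char) (j : Nat) (d : Int),
      L1.foldl (pvPstep L2) (j, d)
        = ((L1.foldl (pvPstep L2) (j, 0)).1, d + (L1.foldl (pvPstep L2) (j, 0)).2) := by
  intro L1
  induction L1 with
  | nil => intro j d; simp
  | cons ch t ih =>
    intro j d
    simp only [List.foldl_cons]
    rcases hp : pvPstep L2 (j, 0) ch with ⟨j1, e⟩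
    rw [pvPstep_shift, hp]
    dsimp only
    rw [ih j1 (d + e), ih j1 e]
    simp [add_assoc]

lemma pvF_shift (L1 L2 : List Char) (a b : Nat) (h : pvF L1 L2 a = pvF L1 L2 b) :
    ∀ k, pvF L1 L2 (a + k) = pvF L1 L2 (b + k) := by
  intro k
  induction k with
  | zero => simpa using h
  | succ k ih =>
    show pvF L1 L2 ((a + k) + 1) = pvF L1 L2 ((b + k) + 1)
    simp only [pvF, ih]

lemma pvS_shift (L1 L2 : List Char) (a b : Nat) (h : pvF L1 L2 a = pvF L1 L2 b) :
    ∀ k, pvS L1 L2 (a + k) - pvS L1 L2 a = pvS L1 L2 (b + k) - pvS L1 L2 b := by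
  intro k
  induction k with
  | zero => simp
  | succ k ih =>
    have hf := pvF_shift L1 L2 a b h k
    show pvS L1 L2 ((a + k) + 1) - _ = pvS L1 L2 ((b + k) + 1) - _
    simp only [pvS, hf]
    omega

lemma pvPeriod (L1 L2 : List Char) (a p : Nat) (h : pvF L1 L2 a = pvF L1 L2 (a + p)) :
    ∀ q : Nat, pvF L1 L2 (a + p + q * p) = pvF L1 L2 (a + p) ∧
      pvS L1 L2 (a + p + q * p)
        = pvS L1 L2 (a + p) + (q : Int) * (pvS L1 L2 (a + p) - pvS L1 L2 a) := by
  intro q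
  induction q with
  | zero => simp
  | succ q ih =>
    obtain ⟨ihF, ihS⟩ := ih
    have hF' : pvF L1 L2 a = pvF L1 L2 (a + p + q * p) := h.trans ihF.symm
    have e1 : a + p + (q + 1) * p = (a + p + q * p) + p := by ring
    have hF2 := pvF_shift L1 L2 a (a + p + q * p) hF' p
    have hS2 := pvS_shift L1 L2 a (a + p + q * p) hF' p
    constructor
    · rw [e1, ← hF2]
    · rw [e1]
      have : pvS L1 L2 ((a + p + q * p) + p)
          = pvS L1 L2 (a + p + q * p) + (pvS L1 L2 (a + p) - pvS L1 L2 a) := by omega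
      rw [this, ihS]
      push_cast
      ring

-- ===== B side =====
def pvBfold (L2 : List Char) (acc : Option (Int × Int)) (L1 : List Char) : Option (Int × Int) :=
  L1.foldl (fun acc ch =>
    match acc with
    | none => none
    | some (c, j) =>
      match PySem.List.pyGet? L2 j with
      | none => none
      | some cj =>
        if ch = cj then
          (if j + 1 = (L2.length : Int) then some (c + 1, 0) else some (c, j + 1))
        else some (c, j)) acc

lemma pvBrow_eq_fold (L1 L2 : List Char) (j : Int) :
    pvBrow L1 L2 j = pvBfold L2 (some (0, j)) L1 := rfl

lemma pvBfold_eq (L2 : List Char) (hm : 0 < L2.length) :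
    ∀ (L1 : List Char) (j : Nat) (cA : Int), j < L2.length →
      pvBfold L2 (some (cA, (j : Int))) L1
        = some (cA + (pvPass L1 L2 j).2, ((pvPass L1 L2 j).1 : Int)) := by
  intro L1
  induction L1 with
  | nil => intro j cA hj; simp [pvBfold, pvPass]
  | cons ch t ih =>
    intro j cA hj
    have hg : PySem.List.pyGet? L2 (j : Int) = some L2[j] := by simp [pysem, hj]
    have hgd : L2.getD j default = L2[j] := List.getD_eq_getElem L2 default hj
    have hpass : pvPass (ch :: t) L2 j = t.foldl (pvPstep L2) (pvPstep L2 (j, 0) ch) := by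
      simp [pvPass]
    have hcons : pvBfold L2 (some (cA, (j : Int))) (ch :: t)
        = pvBfold L2 (if ch = L2[j] then
            (if (j : Int) + 1 = (L2.length : Int) then some (cA + 1, (0 : Int))
             else some (cA, (j : Int) + 1))
          else some (cA, (j : Int))) t := by
      simp only [pvBfold, List.foldl_cons, hg]
    by_cases hch : ch = L2[j]
    · by_cases hwrap : j + 1 = L2.length
      · have hwI : (j : Int) + 1 = (L2.length : Int) := by push_cast; omega
        have hstep : pvPstep L2 (j, 0) ch = (0, 1) := by simp [pvPstep, List.getElem?_eq_getElem hj, hgd, hch, hwrap]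
        rw [hcons, if_pos hch, if_pos hwI,
          show ((0 : Int)) = ((0 : Nat) : Int) from rfl, ih 0 (cA + 1) hm,
          hpass, hstep, foldl_pvPstep_shift L2 t 0 1]
        simp [pvPass]
        ring
      · have hwI : ¬ ((j : Int) + 1 = (L2.length : Int)) := by push_cast; omega
        have hstep : pvPstep L2 (j, 0) ch = (j + 1, 0) := by simp [pvPstep, List.getElem?_eq_getElem hj, hgd, hch, hwrap]
        rw [hcons, if_pos hch, if_neg hwI,
          show ((j : Int) + 1) = ((j + 1 : Nat) : Int) by push_cast; ring,
          ih (j + 1) cA (by omega), hpass, hstep]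
        simp [pvPass]
    · have hstep : pvPstep L2 (j, 0) ch = (j, 0) := by simp [pvPstep, List.getElem?_eq_getElem hj, hch]
      rw [hcons, if_neg hch, ih j cA hj, hpass, hstep]
      simp [pvPass]

lemma pvBrow_eq (L1 L2 : List Char) (hm : 0 < L2.length) (j : Nat) (hj : j < L2.length) :
    pvBrow L1 L2 (j : Int)
      = some ((pvPass L1 L2 j).2, ((pvPass L1 L2 j).1 : Int)) := by
  rw [pvBrow_eq_fold, pvBfold_eq L2 hm L1 j 0 hj]
  simp

-- the table of the 2^i-fold transition, as Source B's cur list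
def pvTbl (L1 L2 : List Char) (p : Nat) : List (Int × Int) :=
  (List.range L2.length).map (fun k => (pvIS L1 L2 k p, ((pvIF L1 L2 k p : Nat) : Int)))

lemma pvTbl_get (L1 L2 : List Char) (p k : Nat) (hk : k < L2.length) :
    PySem.List.pyGet? (pvTbl L1 L2 p) ((k : Nat) : Int)
      = some (pvIS L1 L2 k p, ((pvIF L1 L2 k p : Nat) : Int)) := by
  rw [PySem.List.pyGet?_natCast]
  simp [pvTbl, hk]

lemma pvBuild_aux {α : Type} (g : Int → Option α) (v : Int → α) :
    ∀ (l : List Int) (acc : List α), (∀ j ∈ l, g j = some (v j)) →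
      l.foldl (fun acc j =>
        match acc, g j with
        | some bs, some r => some (bs ++ [r])
        | _, _ => none) (some acc) = some (acc ++ l.map v) := by
  intro l
  induction l with
  | nil => intro acc _; simp
  | cons j t ih =>
    intro acc h
    have hj := h j (List.mem_cons_self)
    simp only [List.foldl_cons, hj]
    rw [ih (acc ++ [v j]) (fun x hx => h x (List.mem_cons_of_mem _ hx))]
    simp

lemma pvBuild_eq {α : Type} (g : Int → Option α) (v : Int → α) (l : List Int)
    (h : ∀ j ∈ l, g j = some (v j)) : pvBuild g l = some (l.map v) := by
  unfold pvBuild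
  rw [pvBuild_aux g v l [] h]
  simp

lemma pyRange_len (m : Nat) :
    PySem.List.pyRange 0 (m : Int) 1 = List.map (fun k => Int.ofNat k) (List.range m) := by
  rw [PySem.List.pyRange_zero_natCast m]
  induction m with
  | zero => simp
  | succ k ih => rw [List.range_succ]; simp_all

lemma pvBase_eq (L1 L2 : List Char) :
    pvBase L1 L2 = some (pvTbl L1 L2 1) := by
  unfold pvBase
  rw [pyRange_len L2.length,
    pvBuild_eq (pvBrow L1 L2)
      (fun j => (pvIS L1 L2 j.toNat 1, ((pvIF L1 L2 j.toNat 1 : Nat) : Int)))]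
  · congr 1
    rw [pvTbl, List.map_map]
    apply List.map_congr_left
    intro k hk
    simp
  · intro j hj
    rw [List.mem_map] at hj
    obtain ⟨k, hk, rfl⟩ := hj
    rw [List.mem_range] at hk
    have hm : 0 < L2.length := by omega
    simp only [Int.ofNat_eq_natCast, Int.toNat_natCast]
    rw [pvBrow_eq L1 L2 hm k hk]
    simp [pvIS, pvIF]

lemma pvCompose_eq (L1 L2 : List Char) (hm : 0 < L2.length) (p : Nat) (hp : 0 < p) :
    pvCompose (pvTbl L1 L2 p) (L2.length : Int) = some (pvTbl L1 L2 (p + p)) := by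
  unfold pvCompose
  rw [pyRange_len L2.length,
    pvBuild_eq (pvCEntry (pvTbl L1 L2 p))
      (fun j => (pvIS L1 L2 j.toNat (p + p), ((pvIF L1 L2 j.toNat (p + p) : Nat) : Int)))]
  · congr 1
    rw [pvTbl, List.map_map]
    apply List.map_congr_left
    intro k hk
    simp
  · intro j hj
    rw [List.mem_map] at hj
    obtain ⟨k, hk, rfl⟩ := hj
    rw [List.mem_range] at hk
    simp only [Int.ofNat_eq_natCast, Int.toNat_natCast]
    have h1 := pvTbl_get L1 L2 p k hk
    have hlt : pvIF L1 L2 k p < L2.length := pvIF_lt L1 L2 hm k hk p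
    have h2 := pvTbl_get L1 L2 p (pvIF L1 L2 k p) hlt
    obtain ⟨hF, hS⟩ := pvIter_add L1 L2 k p p
    unfold pvCEntry
    rw [h1]
    simp only [h2, hF, hS]

lemma pvBloop_run (L1 L2 : List Char) (hm : 0 < L2.length) :
    ∀ (fuel eN tdone p : Nat), 0 < p → eN < 2 ^ fuel →
      pvBloop (L2.length : Int) fuel (pvTbl L1 L2 p)
          (pvIS L1 L2 0 tdone) ((pvIF L1 L2 0 tdone : Nat) : Int) ((eN : Nat) : Int)
        = some (pvIS L1 L2 0 (tdone + eN * p)) := by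
  intro fuel
  induction fuel with
  | zero =>
    intro eN tdone p hp hf
    have : eN = 0 := by omega
    subst this
    unfold pvBloop
    rw [if_neg (by omega)]
    simp
  | succ fuel ih =>
    intro eN tdone p hp hf
    by_cases h0 : eN = 0
    · subst h0
      unfold pvBloop
      rw [if_neg (by omega)]
      simp
    · have hpos : (0 : Int) < ((eN : Nat) : Int) := by omega
      unfold pvBloop
      rw [if_pos hpos]
      have hmod : PySem.Int.mod ((eN : Nat) : Int) 2 = ((eN % 2 : Nat) : Int) :=
        PySem.Int.mod_natCast eN 2
      have hdiv : PySem.Int.floordiv ((eN : Nat) : Int) 2 = ((eN / 2 : Nat) : Int) :=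
        PySem.Int.floordiv_natCast eN 2
      have hcomp := pvCompose_eq L1 L2 hm p hp
      have hidx : pvIF L1 L2 0 tdone < L2.length := pvIF_lt L1 L2 hm 0 hm tdone
      have hget := pvTbl_get L1 L2 p (pvIF L1 L2 0 tdone) hidx
      obtain ⟨hFa, hSa⟩ := pvIter_add L1 L2 0 tdone p
      by_cases hb : eN % 2 = 1
      · have hmod1 : PySem.Int.mod ((eN : Nat) : Int) 2 = 1 := by rw [hmod, hb]; simp
        have hrec := ih (eN / 2) (tdone + p) (p + p) (by omega)
          (by rw [pow_succ] at hf; omega)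
        rw [hSa, hFa] at hrec
        have hq : eN / 2 * 2 + 1 = eN := by omega
        have harith : (tdone + p) + (eN / 2) * (p + p) = tdone + eN * p := by
          calc (tdone + p) + (eN / 2) * (p + p) = tdone + (eN / 2 * 2 + 1) * p := by ring
            _ = tdone + eN * p := by rw [hq]
        rw [harith] at hrec
        rw [if_pos hmod1, hget, hcomp, hdiv]
        exact hrec
      · have hmod0 : ¬ PySem.Int.mod ((eN : Nat) : Int) 2 = 1 := by
          rw [hmod]
          have : eN % 2 = 0 := by omega
          rw [this]
          simp
        have hrec := ih (eN / 2) tdone (p + p) (by omega)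
          (by rw [pow_succ] at hf; omega)
        have hq : eN / 2 * 2 = eN := by omega
        have harith : tdone + (eN / 2) * (p + p) = tdone + eN * p := by
          calc tdone + (eN / 2) * (p + p) = tdone + (eN / 2 * 2) * p := by ring
            _ = tdone + eN * p := by rw [hq]
        rw [harith] at hrec
        rw [if_neg hmod0, hcomp, hdiv]
        exact hrec

-- A-side invariant machinery
def pvMapInv (L1 L2 : List Char) (mp : PySem.Dict (Int × Int) (Int × Int)) (c : Nat) : Prop :=
  ∀ (ii pc pt : Int), mp.get? (0, ii) = some (pc, pt) →
    ∃ cn : Nat, cn ≤ c ∧ pc = (cn : Int) ∧ pt = pvS L1 L2 cn ∧ ii = ((pvF L1 L2 cn : Nat) : Int)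

lemma pvMapInv_insert (L1 L2 : List Char) (mp : PySem.Dict (Int × Int) (Int × Int)) (c : Nat)
    (hinv : pvMapInv L1 L2 mp c) (cN c' : Nat) (hc : c ≤ c') (hcN : cN ≤ c') :
    pvMapInv L1 L2
      (mp.insert ((0 : Int), ((pvF L1 L2 cN : Nat) : Int)) ((cN : Int), pvS L1 L2 cN)) c' := by
  intro ii pc pt hget
  by_cases hkey : ((0 : Int), ii) = (((0 : Int)), ((pvF L1 L2 cN : Nat) : Int))
  · rw [hkey] at hget
    simp [pysem] at hget
    exact ⟨cN, hcN, hget.1.symm, hget.2.symm, by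
      have : ii = ((pvF L1 L2 cN : Nat) : Int) := by simpa using congrArg Prod.snd hkey
      exact this⟩
  · rw [PySem.Dict.get?_insert_of_ne _ _ hkey] at hget
    obtain ⟨cn, h1, h2, h3, h4⟩ := hinv ii pc pt hget
    exact ⟨cn, le_trans h1 hc, h2, h3, h4⟩

lemma pvAgo_run (L1 L2 : List Char) (n1 : Int) (hm : 0 < L2.length) (hL : 0 < L1.length)
    (hn : 0 < n1) :
    ∀ (fuel : Nat) (c p : Nat) (mp : PySem.Dict (Int × Int) (Int × Int)),
      c ≤ n1.toNat → p < L1.length → (p ≠ 0 → c < n1.toNat) → pvMapInv L1 L2 mp c →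
      (n1.toNat - c) * L1.length + (L1.length - p) ≤ fuel →
      pvAgo L1 L2 n1 fuel (c : Int)
          (pvS L1 L2 c + ((L1.take p).foldl (pvPstep L2) (pvF L1 L2 c, 0)).2)
          (p : Int) ((((L1.take p).foldl (pvPstep L2) (pvF L1 L2 c, 0)).1 : Nat) : Int) mp
        = some (pvS L1 L2 n1.toNat) := by
  intro fuel
  induction fuel with
  | zero => intro c p mp hc hp hp0 hinv hfuel; omega
  | succ fu ih =>
    intro c p mp hc hp hp0 hinv hfuel
    by_cases hlt : (c : Int) < n1
    · have hclt : c < n1.toNat := by omega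
      set st := (L1.take p).foldl (pvPstep L2) (pvF L1 L2 c, 0) with hstdef
      have hstlt : st.1 < L2.length :=
        foldl_pvPstep_fst_lt L2 hm _ _ (pvF_lt L1 L2 hm c)
      have hg1 : PySem.List.pyGet? L1 (p : Int) = some L1[p] := by simp [pysem, hp]
      have hg2 : PySem.List.pyGet? L2 ((st.1 : Nat) : Int) = some L2[st.1] := by
        simp [pysem, hstlt]
      have hgd : L2.getD st.1 default = L2[st.1] := List.getD_eq_getElem L2 default hstlt
      have htake : L1.take (p + 1) = L1.take p ++ [L1[p]] := List.take_succ_eq_append_getElem hp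
      have hst' : (L1.take (p + 1)).foldl (pvPstep L2) (pvF L1 L2 c, 0)
          = pvPstep L2 st L1[p] := by
        rw [htake, List.foldl_append, ← hstdef]; simp
      have hi2a : (if L1[p] = L2[st.1] then
            (if (st.1 : Int) + 1 = (L2.length : Int) then (0 : Int) else (st.1 : Int) + 1)
          else (st.1 : Int)) = (((pvPstep L2 st L1[p]).1 : Nat) : Int) := by
        unfold pvPstep
        rw [hgd]
        by_cases h1 : L1[p] = L2[st.1] <;> by_cases h2 : st.1 + 1 = L2.length <;>
          simp [h1, h2] <;> omega
      have hs2a : (if L1[p] = L2[st.1] ∧ (st.1 : Int) + 1 = (L2.length : Int) then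
            (pvS L1 L2 c + st.2) + 1 else pvS L1 L2 c + st.2)
          = pvS L1 L2 c + (pvPstep L2 st L1[p]).2 := by
        unfold pvPstep
        rw [hgd]
        by_cases h1 : L1[p] = L2[st.1] <;> by_cases h2 : st.1 + 1 = L2.length <;>
          simp [h1, h2] <;> omega
      unfold pvAgo
      rw [if_pos hlt]
      simp only [hg1, hg2]
      rw [hi2a, hs2a]
      by_cases hpe : p + 1 = L1.length
      · have hpI : (p : Int) + 1 = (L1.length : Int) := by push_cast; omega
        rw [if_pos hpI]
        have hfull : pvPstep L2 st L1[p] = pvPass L1 L2 (pvF L1 L2 c) := by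
          rw [← hst', hpe]
          simp [pvPass]
        have hF1 : (pvPstep L2 st L1[p]).1 = pvF L1 L2 (c + 1) := by
          rw [hfull]; rfl
        have hS1 : pvS L1 L2 c + (pvPstep L2 st L1[p]).2 = pvS L1 L2 (c + 1) := by
          rw [hfull]; simp [pvS]
        have hmeas : (n1.toNat - (c + 1)) * L1.length + L1.length
            = (n1.toNat - c) * L1.length := by
          have h1 : n1.toNat - c = (n1.toNat - (c + 1)) + 1 := by omega
          rw [h1]; ring
        rw [hF1, hS1]
        cases hmget : mp.get? ((0 : Int), ((pvF L1 L2 (c + 1) : Nat) : Int)) with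
        | none =>
          simp only [hmget]
          have hrec := ih (c + 1) 0
            (mp.insert ((0 : Int), ((pvF L1 L2 (c + 1) : Nat) : Int))
              (((c + 1 : Nat) : Int), pvS L1 L2 (c + 1)))
            (by omega) (by omega) (fun h => absurd rfl h)
            (pvMapInv_insert L1 L2 mp c hinv (c + 1) (c + 1) (by omega) le_rfl)
            (by omega)
          push_cast at hrec ⊢
          simpa using hrec
        | some pv =>
          obtain ⟨ppc, ppt⟩ := pv
          simp only [hmget]
          obtain ⟨cn, hcnle, hpc, hpt, hii⟩ := hinv _ ppc ppt hmget
          have hFcn : pvF L1 L2 cn = pvF L1 L2 (c + 1) := by exact_mod_cast hii.symm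
          have hcl : (c : Int) + 1 - ppc = (((c + 1) - cn : Nat) : Int) := by omega
          have hclpos : (0 : Int) < (((c + 1) - cn : Nat) : Int) := by omega
          have hq0 : 0 ≤ PySem.Int.floordiv (n1 - ((c : Int) + 1)) ((c : Int) + 1 - ppc) := by
            rw [hcl, PySem.Int.floordiv_eq_ediv_of_pos hclpos]
            exact Int.ediv_nonneg (by omega) hclpos.le
          set q := PySem.Int.floordiv (n1 - ((c : Int) + 1)) ((c : Int) + 1 - ppc) with hqdef
          have hqle : q * (((c + 1) - cn : Nat) : Int) ≤ n1 - ((c : Int) + 1) := by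
            rw [hqdef, hcl, PySem.Int.floordiv_eq_ediv_of_pos hclpos]
            exact Int.ediv_mul_le _ hclpos.ne'
          set qn := q.toNat with hqn
          have hqcast : (qn : Int) = q := Int.toNat_of_nonneg hq0
          set chat := (c + 1) + qn * ((c + 1) - cn) with hchat
          have hchat_le : chat ≤ n1.toNat := by
            have h1 : ((qn * ((c + 1) - cn) : Nat) : Int) ≤ n1 - ((c : Int) + 1) := by
              push_cast [← hqcast] at hqle ⊢
              exact hqle
            generalize hA : qn * ((c + 1) - cn) = A at *
            omega
          have hper := pvPeriod L1 L2 cn ((c + 1) - cn)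
            (by rw [hFcn]; congr 1; omega) qn
          rw [show cn + ((c + 1) - cn) = c + 1 by omega] at hper
          obtain ⟨hperF, hperS⟩ := hper
          have hk' : (c : Int) + 1 + q * ((c : Int) + 1 - ppc) = ((chat : Nat) : Int) := by
            rw [hcl, ← hqcast, hchat]; push_cast; ring
          have htot' : pvS L1 L2 (c + 1) + q * (pvS L1 L2 (c + 1) - ppt)
              = pvS L1 L2 chat := by
            rw [hpt, ← hqcast, hchat]
            rw [show (c + 1) + qn * ((c + 1) - cn)
              = cn + ((c + 1) - cn) + qn * ((c + 1) - cn) by omega] at *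
            rw [show cn + ((c + 1) - cn) = c + 1 by omega] at *
            rw [hperS]
          have hidx : ((pvF L1 L2 (c + 1) : Nat) : Int) = ((pvF L1 L2 chat : Nat) : Int) := by
            rw [show chat = cn + ((c + 1) - cn) + qn * ((c + 1) - cn) by omega] at *
            rw [show cn + ((c + 1) - cn) = c + 1 by omega] at *
            rw [hperF]
          rw [hk', htot', hidx]
          have hrec := ih chat 0
            (mp.insert ((0 : Int), ((pvF L1 L2 chat : Nat) : Int))
              (((chat : Nat) : Int), pvS L1 L2 chat))
            hchat_le (by omega) (fun h => absurd rfl h)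
            (pvMapInv_insert L1 L2 mp c hinv chat chat (by omega) le_rfl)
            (by
              have h2 : (n1.toNat - chat) * L1.length ≤ (n1.toNat - (c + 1)) * L1.length :=
                Nat.mul_le_mul_right _ (by omega)
              omega)
          push_cast at hrec ⊢
          simpa using hrec
      · have hpI : ¬ ((p : Int) + 1 = (L1.length : Int)) := by push_cast; omega
        rw [if_neg hpI]
        have hrec := ih c (p + 1) mp hc (by omega) (fun _ => hclt) hinv (by omega)
        rw [hst'] at hrec
        push_cast at hrec ⊢
        exact hrec
    · have hceq : c = n1.toNat := by omega
      have hp0' : p = 0 := by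
        by_contra hne
        exact absurd (hp0 hne) (by omega)
      subst hp0'
      unfold pvAgo
      rw [if_neg hlt]
      simp [pvS, hceq]

lemma pvEmptyMapInv (L1 L2 : List Char) : pvMapInv L1 L2 PySem.Dict.empty 0 := by
  intro ii pc pt h
  simp [pysem] at h

theorem getMaxRepetitions_spec' (s1 : String) (n1 : Int) (s2 : String) (n2 : Int)
    (hpre : (¬ ∀ c ∈ s2.toList, c ∈ s1.toList) ∨
      (n2 ≠ 0 ∧ (n1 ≤ 0 ∨ s2.toList ≠ []))) :
    getMaxRepetitions s1 n1 s2 n2 = getMaxRepetitions_alt s1 n1 s2 n2 := by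
  by_cases hsub : PySem.Set.issubset (PySem.Set.ofList s2.toList) (PySem.Set.ofList s1.toList) = true
  · have hsub' : ∀ x ∈ s2.toList, x ∈ s1.toList := by
      simpa [PySem.Set.issubset_iff, PySem.Set.mem_ofList] using hsub
    rcases hpre with hns | ⟨hn2, hcase⟩
    · exact absurd hsub' hns
    · by_cases hn : 0 < n1
      · have hne2 : s2.toList ≠ [] := by
          rcases hcase with hle | h
          · omega
          · exact h
        have hm : 0 < s2.toList.length := List.length_pos_of_ne_nil hne2
        have hL : 0 < s1.toList.length := by
          cases h2 : s2.toList with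
          | nil => exact absurd h2 hne2
          | cons c t =>
            have hc : c ∈ s1.toList := hsub' c (by rw [h2]; exact List.mem_cons_self)
            cases hs1 : s1.toList with
            | nil => rw [hs1] at hc; simp at hc
            | cons a b => simp [hs1]
        have hA := pvAgo_run s1.toList s2.toList n1 hm hL hn
          (n1.toNat * s1.toList.length + s1.toList.length + 1) 0 0 PySem.Dict.empty
          (by omega) hL (fun h => absurd rfl h) (pvEmptyMapInv _ _) (by simp only [Nat.sub_zero]; omega)
        have hfuel : n1.toNat < 2 ^ (n1.toNat + 1) := by
          calc n1.toNat < 2 ^ n1.toNat := Nat.lt_two_pow_self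
            _ ≤ 2 ^ (n1.toNat + 1) := Nat.pow_le_pow_right (by omega) (by omega)
        have hB := pvBloop_run s1.toList s2.toList hm (n1.toNat + 1) n1.toNat 0 1
          (by omega) hfuel
        have hn1 : ((n1.toNat : Nat) : Int) = n1 := Int.toNat_of_nonneg (by omega)
        rw [hn1] at hB
        simp only [pvIS, pvIF, Nat.cast_zero, Nat.zero_add, Nat.mul_one] at hB
        simp only [pvS, pvF, List.take_zero, List.foldl_nil, Nat.cast_zero, add_zero] at hA
        rw [pvS_eq_pvIS] at hA
        simp only [getMaxRepetitions, getMaxRepetitions_alt, hsub, if_true,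
          pvBase_eq, hA, hB]
      · have hA : pvAgo s1.toList s2.toList n1
            (n1.toNat * s1.toList.length + s1.toList.length + 1) 0 0 0 0 PySem.Dict.empty
            = some 0 := by
          unfold pvAgo; rw [if_neg (by omega)]
        have hB : pvBloop (s2.toList.length : Int) (n1.toNat + 1) (pvTbl s1.toList s2.toList 1)
            0 0 n1 = some 0 := by
          unfold pvBloop; rw [if_neg (by omega)]
        simp only [getMaxRepetitions, getMaxRepetitions_alt, hsub, if_true,
          pvBase_eq, hA, hB]
  · simp only [getMaxRepetitions, getMaxRepetitions_alt, hsub, if_false, Bool.false_eq_true]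

-- ===== VERDICT (by name: the statement is the Claim_ definition above) =====
theorem getMaxRepetitions_spec : Claim_equal_getMaxRepetitions := by
  intro s1 n1 s2 n2 hdom hpre
  unfold Pre_getMaxRepetitions at hpre
  unfold Spec_getMaxRepetitions
  rcases hpre with h | h
  · refine getMaxRepetitions_spec' s1 n1 s2 n2 (Or.inl ?_)
    simpa using h
  · exact getMaxRepetitions_spec' s1 n1 s2 n2 (Or.inr h)
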